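-- pv_equiv track=rewrite | github.com/Shuaibullattil/Network-lab | playfiar_server.py | preprocess_playfair
-- ===== SOURCE A (Python) =====
-- def preprocess_playfair(message):
--     message = message.lower()
--     message = message.replace(" ", "")
--     message = message.replace("j", "i")
--
--     pairs = []
--     i = 0
--     while i < len(message):
--         a = message[i]
--         if i + 1 < len(message):
--             b = message[i + 1]
--             if a == b:
--                 pairs.append(a + 'x')
--                 i += 1
--             else:
--                 pairs.append(a + b)
--                 i += 2
--         else:
--             pairs.append(a + 'x')
--             i += 1
--     return ''.join(pairs), pairs
-- ===== SOURCE B (Python) =====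
-- def preprocess_playfair(message):
--     message = message.lower().replace(" ", "").replace("j", "i")
--     buf = []
--     for ch in message:
--         if len(buf) % 2 == 1 and buf[-1] == ch:
--             buf.append('x')
--         buf.append(ch)
--     if len(buf) % 2 == 1:
--         buf.append('x')
--     text = ''.join(buf)
--     pairs = [text[i:i + 2] for i in range(0, len(text), 2)]
--     return text, pairs
-- ===== Notes on version B (the rewrite author's own statement) =====
-- stated objective: alternative
-- what changed: Replaces A's two-index while-loop with variable increments (building pair strings directly) by a single-pass flat character buffer with pair-parity duplicate/pad logic, followed by a separate chunking pass over range(0,len,2).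
import Mathlib
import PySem

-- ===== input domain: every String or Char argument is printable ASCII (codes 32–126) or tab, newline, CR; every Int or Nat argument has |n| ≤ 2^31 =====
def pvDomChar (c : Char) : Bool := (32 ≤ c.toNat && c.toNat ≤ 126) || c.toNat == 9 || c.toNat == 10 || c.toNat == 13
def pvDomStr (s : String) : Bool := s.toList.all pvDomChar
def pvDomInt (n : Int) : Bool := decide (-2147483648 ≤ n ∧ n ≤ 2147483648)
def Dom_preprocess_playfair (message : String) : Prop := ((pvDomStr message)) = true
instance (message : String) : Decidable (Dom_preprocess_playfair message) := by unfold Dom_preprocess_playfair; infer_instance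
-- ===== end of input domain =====

-- B replaces A's two-index scan that builds pair strings directly by a flat buffer pass
-- with pair-parity duplicate/pad logic plus a separate chunking pass (objective: alternative).

-- ===== PORT A =====
-- the while-loop of A: index i over the preprocessed characters, building pair strings
def pvA_loop (msg : List Char) (i : Nat) : List String :=
  if h : i < msg.length then
    let a := msg[i]
    if h2 : i + 1 < msg.length then
      let b := msg[i + 1]
      if a == b then
        String.ofList [a, 'x'] :: pvA_loop msg (i + 1)
      else
        String.ofList [a, b] :: pvA_loop msg (i + 2)
    else
      String.ofList [a, 'x'] :: pvA_loop msg (i + 1)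
  else []
termination_by msg.length - i

def preprocess_playfair (message : String) : String × List String :=
  let m1 := PySem.Str.lower message
  let m2 := PySem.Str.replace m1 " " ""
  let m3 := PySem.Str.replace m2 "j" "i"
  let pairs := pvA_loop m3.toList 0
  (PySem.Str.join "" pairs, pairs)

-- ===== PORT B =====
-- loop body of Source B: append ch, inserting 'x' before it at an odd pair boundary on a duplicate
def pvB_step (buf : List Char) (ch : Char) : List Char :=
  (if buf.length % 2 == 1 && PySem.List.pyGet? buf (-1) == some ch then buf ++ ['x'] else buf) ++ [ch]

-- final 'if len(buf) % 2 == 1: buf.append("x")' of Source B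
def pvPad (buf : List Char) : List Char :=
  if buf.length % 2 == 1 then buf ++ ['x'] else buf

-- '[text[i:i+2] for i in range(0, len(text), 2)]' of Source B
def pvChunk (t : List Char) : List String :=
  (PySem.List.pyRange 0 (t.length : Int) 2).map
    (fun i => String.ofList (PySem.List.slice t (some i) (some (i + 2))))

def preprocess_playfair_alt (message : String) : String × List String :=
  let m1 := PySem.Str.lower message
  let m2 := PySem.Str.replace m1 " " ""
  let m3 := PySem.Str.replace m2 "j" "i"
  let buf := m3.toList.foldl pvB_step []
  let text := pvPad buf
  (String.ofList text, pvChunk text)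

-- ===== PRECONDITION & SPEC =====
def Spec_preprocess_playfair (message : String) (out : String × List String) : Prop := out = preprocess_playfair_alt message
instance (message : String) (out : String × List String) : Decidable (Spec_preprocess_playfair message out) := by unfold Spec_preprocess_playfair; infer_instance

-- ===== CLAIM (what is proved, stated in full; the proofs are below) =====
def Claim_equal_preprocess_playfair : Prop := ∀ (message : String), Dom_preprocess_playfair message → Spec_preprocess_playfair message (preprocess_playfair message)

-- ===== LEMMAS AND PROOFS =====

-- canonical digraph decomposition both programs compute
def pvCanon : List Char → List String
  | [] => []
  | [a] => [String.ofList [a, 'x']]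
  | a :: b :: rest =>
    if a == b then String.ofList [a, 'x'] :: pvCanon (b :: rest)
    else String.ofList [a, b] :: pvCanon rest

lemma pvA_eq (msg : List Char) (i : Nat) : pvA_loop msg i = pvCanon (msg.drop i) := by
  fun_induction pvA_loop msg i with
  | case1 i h a h2 b hab ih =>
    rw [List.drop_eq_getElem_cons h, List.drop_eq_getElem_cons h2]
    simp only [pvCanon, ih]
    rw [if_pos (show (msg[i] == msg[i + 1]) = true from hab), List.drop_eq_getElem_cons h2]
  | case2 i h a h2 b hab ih =>
    rw [List.drop_eq_getElem_cons h, List.drop_eq_getElem_cons h2]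
    simp only [pvCanon, ih]
    rw [if_neg (show ¬ (msg[i] == msg[i + 1]) = true from hab)]
  | case3 i h a h2 ih =>
    have hnil : msg.drop (i + 1) = [] := List.drop_eq_nil_of_le (by omega)
    rw [List.drop_eq_getElem_cons h, hnil]
    simp [pvCanon, ih, hnil]
    rfl
  | case4 i h =>
    rw [List.drop_eq_nil_of_le (by omega)]
    rfl

lemma pvB_inv : ∀ (l : List Char), ∀ E : List Char, E.length % 2 = 0 →
    pvPad (List.foldl pvB_step E l) = E ++ (pvCanon l).flatMap String.toList := by
  intro l
  induction l using pvCanon.induct with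
  | case1 =>
    intro E hE
    simp [pvPad, pvCanon, Nat.mod_two_ne_one.mpr hE]
  | case2 a =>
    intro E hE
    have hodd : (E.length + 1) % 2 = 1 := by omega
    have hstep : pvB_step E a = E ++ [a] := by
      simp [pvB_step, Nat.mod_two_ne_one.mpr hE]
    simp [pvCanon, hstep, pvPad, hodd]
  | case3 a b rest hab ih =>
    intro E hE
    have hodd : (E.length + 1) % 2 = 1 := by omega
    have h1 : pvB_step E a = E ++ [a] := by
      simp [pvB_step, Nat.mod_two_ne_one.mpr hE]
    have hba : b = a := (beq_iff_eq.mp hab).symm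
    -- step on b with odd buffer and duplicate last char: insert 'x' then append b
    have h3 : pvB_step (E ++ [a]) b = E ++ [a, 'x', b] := by
      subst hba
      simp [pvB_step, hodd]
    have h4 : pvB_step (E ++ [a, 'x']) b = E ++ [a, 'x', b] := by
      simp [pvB_step, Nat.mod_two_ne_one.mpr hE]
    have key : List.foldl pvB_step E (a :: b :: rest) =
        List.foldl pvB_step (E ++ [a, 'x']) (b :: rest) := by
      simp only [List.foldl_cons, h1, h3, h4]
    rw [key, ih (E ++ [a, 'x']) (by simp; omega)]
    simp [pvCanon, hab]
  | case4 a b rest hab ih =>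
    intro E hE
    have hodd : (E.length + 1) % 2 = 1 := by omega
    have h1 : pvB_step E a = E ++ [a] := by
      simp [pvB_step, Nat.mod_two_ne_one.mpr hE]
    have h3 : pvB_step (E ++ [a]) b = E ++ [a, b] := by
      have : ¬ (a = b) := by
        intro h; rw [h] at hab; simp at hab
      simp [pvB_step, hodd, this]
    have key : List.foldl pvB_step E (a :: b :: rest) =
        List.foldl pvB_step (E ++ [a, b]) rest := by
      simp only [List.foldl_cons, h1, h3]
    rw [key, ih (E ++ [a, b]) (by simp; omega)]
    simp [pvCanon, hab]

lemma pvChunk_as_range (t : List Char) :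
    pvChunk t = (List.range ((t.length + 1) / 2)).map
      (fun k => String.ofList ((t.drop (2 * k)).take 2)) := by
  unfold pvChunk
  rw [PySem.List.pyRange_of_pos 0 (t.length : Int) (by norm_num), List.map_map]
  rcases Nat.eq_zero_or_pos t.length with h0 | hpos
  · simp [h0]
  · have hlt : (0 : Int) < (t.length : Int) := by exact_mod_cast hpos
    rw [if_pos hlt]
    have hcnt : (((t.length : Int) - 0 + 2 - 1) / 2).toNat = (t.length + 1) / 2 := by omega
    rw [hcnt]
    refine List.map_congr_left (fun k _ => ?_)
    simp only [Function.comp_apply]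
    rw [show (0 : Int) + 2 * (k : Int) = ((2 * k : Nat) : Int) by push_cast; ring,
      show ((2 * k : Nat) : Int) + 2 = ((2 * k : Nat) : Int) + ((2 : Nat) : Int) by norm_num,
      PySem.List.slice_natCast_add]

lemma pvChunk_pairs : ∀ ps : List String, (∀ s ∈ ps, s.toList.length = 2) →
    pvChunk (ps.flatMap String.toList) = ps := by
  intro ps
  induction ps with
  | nil => intro _; rfl
  | cons s ps ih =>
    intro h
    have hs : s.toList.length = 2 := h s List.mem_cons_self
    have hrest := ih (fun x hx => h x (List.mem_cons_of_mem _ hx))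
    rw [pvChunk_as_range]
    have hlen : ((s :: ps).flatMap String.toList).length
        = (ps.flatMap String.toList).length + 2 := by
      simp [List.flatMap_cons, hs]; omega
    rw [hlen, show ((ps.flatMap String.toList).length + 2 + 1) / 2
        = ((ps.flatMap String.toList).length + 1) / 2 + 1 by omega,
      List.range_succ_eq_map, List.map_cons, List.map_map]
    congr 1
    · simp only [Nat.mul_zero, List.drop_zero, List.flatMap_cons]
      rw [List.take_append_of_le_length (by omega), List.take_of_length_le (by omega),
        String.ofList_toList]
    · have hpt : ∀ k ∈ List.range (((ps.flatMap String.toList).length + 1) / 2),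
          ((fun k => String.ofList ((((s :: ps).flatMap String.toList).drop (2 * k)).take 2))
            ∘ Nat.succ) k
          = String.ofList (((ps.flatMap String.toList).drop (2 * k)).take 2) := by
        intro k _
        simp only [Function.comp_apply, List.flatMap_cons]
        congr 2
        rw [List.drop_append, List.drop_eq_nil_of_le (by omega)]
        simp only [List.nil_append]
        congr 1
        omega
      rw [List.map_congr_left hpt, ← pvChunk_as_range]
      exact hrest

lemma pvCanon_len : ∀ l : List Char, ∀ s ∈ pvCanon l, s.toList.length = 2 := by
  intro l
  induction l using pvCanon.induct with
  | case1 => intro s hs; simp [pvCanon] at hs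
  | case2 a => intro s hs; simp [pvCanon] at hs; simp [hs]
  | case3 a b rest hab ih =>
    intro s hs
    simp only [pvCanon, hab, if_true] at hs
    rcases List.mem_cons.mp hs with h | h
    · simp [h]
    · exact ih s h
  | case4 a b rest hab ih =>
    intro s hs
    simp only [pvCanon, hab, Bool.false_eq_true, if_false] at hs
    rcases List.mem_cons.mp hs with h | h
    · simp [h]
    · exact ih s h

lemma pvJoin_flat : ∀ ps : List String,
    PySem.Str.join "" ps = String.ofList (ps.flatMap String.toList) := by
  have chars : ∀ ls : List (List Char), PySem.Chars.join [] ls = ls.flatten := by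
    intro ls
    induction ls with
    | nil => exact PySem.Chars.join_nil []
    | cons p rest ih =>
      cases rest with
      | nil => simp [PySem.Chars.join_singleton]
      | cons q rs => rw [PySem.Chars.join_cons_cons, ih]; simp
  intro ps
  have hts : (PySem.Str.join "" ps).toList = ps.flatMap String.toList := by
    rw [PySem.Str.toList_join, show ("" : String).toList = [] from rfl, chars]
    simp [List.flatMap_def]
  rw [← hts, String.ofList_toList]

lemma pvCore (L : List Char) :
    (PySem.Str.join "" (pvA_loop L 0), pvA_loop L 0)
      = (String.ofList (pvPad (L.foldl pvB_step [])),
         pvChunk (pvPad (L.foldl pvB_step []))) := by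
  have hbuf : pvPad (L.foldl pvB_step []) = (pvCanon L).flatMap String.toList :=
    pvB_inv L [] rfl
  have hA : pvA_loop L 0 = pvCanon L := by simpa using pvA_eq L 0
  rw [hA, hbuf, pvJoin_flat, pvChunk_pairs (pvCanon L) (pvCanon_len L)]

-- ===== VERDICT (by name: the statement is the Claim_ definition above) =====
theorem preprocess_playfair_spec : Claim_equal_preprocess_playfair := by
  intro message _
  show preprocess_playfair message = preprocess_playfair_alt message
  simp only [preprocess_playfair, preprocess_playfair_alt]
  exact pvCore _
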